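-- pv_equiv track=rewrite | github.com/merophise/mizue | mizue/printer/table_printer.py | find_max_cell_length
-- ===== SOURCE A (Python) =====
-- def find_max_cell_length(row_data: list):
--     max_length_list = [0] * len(row_data[0])
--     cell_index = 0
--     for row in row_data:
--         for cell in row:
--             max_length_list[cell_index] = max(len(cell), max_length_list[cell_index])
--             cell_index += 1
--         cell_index = 0
--     return max_length_list
-- ===== SOURCE B (Python) =====
-- def find_max_cell_length(row_data: list):
--     width = len(row_data[0])
--     return [max((len(row[j]) for row in row_data if j < len(row)), default=0)
--             for j in range(width)]
-- ===== Notes on version B (the rewrite author's own statement) =====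
-- stated objective: simpler
-- what changed: Column-major: one comprehension taking the max cell length per column index, replacing the row-major loop with its mutable list and cell_index counter.
import Mathlib
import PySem

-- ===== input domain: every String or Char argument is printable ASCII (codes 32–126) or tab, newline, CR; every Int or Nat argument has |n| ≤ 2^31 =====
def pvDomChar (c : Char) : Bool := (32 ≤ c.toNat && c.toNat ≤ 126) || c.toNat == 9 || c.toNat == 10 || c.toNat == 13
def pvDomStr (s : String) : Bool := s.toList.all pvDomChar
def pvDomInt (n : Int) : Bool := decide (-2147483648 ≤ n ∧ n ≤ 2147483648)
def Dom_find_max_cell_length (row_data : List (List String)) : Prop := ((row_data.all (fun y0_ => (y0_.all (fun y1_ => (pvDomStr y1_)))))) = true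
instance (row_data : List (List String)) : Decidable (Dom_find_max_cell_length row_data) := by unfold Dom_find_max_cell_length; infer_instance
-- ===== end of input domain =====

-- B computes the per-column maxima column-by-column in one comprehension, replacing A's
-- row-major loop with its mutable list and cell_index counter (objective: simpler).

-- ===== PORT A =====
-- row-major: mutable max_length_list indexed by cell_index, reset per row
def find_max_cell_length (row_data : List (List String)) : List Int :=
  (row_data.foldl
    (fun lst row =>
      (row.foldl
        (fun (p : List Int × Nat) cell =>
          (p.1.set p.2 (max (PySem.Str.len cell) (p.1.getD p.2 0)), p.2 + 1))
        (lst, 0)).1)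
    (List.replicate ((PySem.List.pyGet? row_data 0).getD []).length (0 : Int)))

-- ===== PORT B =====
-- column-major: for each column index j, the max of len(row[j]) over rows having a j-th cell
def find_max_cell_length_alt (row_data : List (List String)) : List Int :=
  (List.range ((PySem.List.pyGet? row_data 0).getD []).length).map
    (fun j =>
      row_data.foldl
        (fun m row => if j < row.length then max m (PySem.Str.len (row.getD j "")) else m)
        0)

-- ===== PRECONDITION & SPEC =====
-- Pre_ excludes exactly the inputs where A raises IndexError: empty row_data
-- (len(row_data[0])), or a row longer than the first row (cell_index runs past the list).
def Pre_find_max_cell_length (row_data : List (List String)) : Prop :=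
  row_data ≠ [] ∧ ∀ row ∈ row_data, row.length ≤ (row_data.headD []).length
instance (row_data : List (List String)) : Decidable (Pre_find_max_cell_length row_data) := by
  unfold Pre_find_max_cell_length; infer_instance
def pvWitness_find_max_cell_length : List (List String) := [["ab", "c"], ["d", "efg"]]

def Spec_find_max_cell_length (row_data : List (List String)) (out : List Int) : Prop :=
  out = find_max_cell_length_alt row_data
instance (row_data : List (List String)) (out : List Int) : Decidable (Spec_find_max_cell_length row_data out) := by
  unfold Spec_find_max_cell_length; infer_instance

-- ===== CLAIM (what is proved, stated in full; the proofs are below) =====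
def Claim_equal_find_max_cell_length : Prop := ∀ (row_data : List (List String)), Dom_find_max_cell_length row_data → Pre_find_max_cell_length row_data → Spec_find_max_cell_length row_data (find_max_cell_length row_data)

-- ===== LEMMAS AND PROOFS =====

-- A's inner loop over one row, started at index k, as a pointwise description.
theorem inner_desc (row : List String) :
    ∀ (lst : List Int) (k : Nat), k + row.length ≤ lst.length →
    (((row.foldl
        (fun (p : List Int × Nat) cell =>
          (p.1.set p.2 (max (PySem.Str.len cell) (p.1.getD p.2 0)), p.2 + 1))
        (lst, k)).1).length = lst.length ∧
     ∀ j : Nat,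
       ((row.foldl
        (fun (p : List Int × Nat) cell =>
          (p.1.set p.2 (max (PySem.Str.len cell) (p.1.getD p.2 0)), p.2 + 1))
        (lst, k)).1).getD j 0 =
        if k ≤ j ∧ j < k + row.length then
          max (PySem.Str.len (row.getD (j - k) "")) (lst.getD j 0)
        else lst.getD j 0) := by
  induction row with
  | nil =>
    intro lst k h
    refine ⟨rfl, ?_⟩
    intro j
    simp only [List.foldl_nil]
    rw [if_neg (by simp only [List.length_nil]; omega)]
  | cons c cs ih =>
    intro lst k h
    simp only [List.foldl_cons]
    have hlen : (lst.set k (max (PySem.Str.len c) (lst.getD k 0))).length = lst.length := by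
      simp
    have h' : (k + 1) + cs.length ≤ (lst.set k (max (PySem.Str.len c) (lst.getD k 0))).length := by
      simp only [List.length_set]; simp only [List.length_cons] at h; omega
    obtain ⟨ihlen, ihget⟩ := ih (lst.set k (max (PySem.Str.len c) (lst.getD k 0))) (k + 1) h'
    refine ⟨by rw [ihlen, hlen], ?_⟩
    intro j
    rw [ihget j]
    have hset : (lst.set k (max (PySem.Str.len c) (lst.getD k 0))).getD j 0 =
        if j = k then max (PySem.Str.len c) (lst.getD j 0) else lst.getD j 0 := by
      by_cases hj : j = k
      · subst hj
        have hk : j < lst.length := by simp only [List.length_cons] at h; omega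
        simp [List.getD, hk]
      · simp [List.getD, Ne.symm hj, hj]
    by_cases hj : j = k
    · subst hj
      rw [if_neg (by omega), hset, if_pos rfl,
        if_pos (show j ≤ j ∧ j < j + (c :: cs).length by
          exact ⟨le_refl _, by simp only [List.length_cons]; omega⟩)]
      simp [List.getD]
    · by_cases hr : k + 1 ≤ j ∧ j < k + 1 + cs.length
      · have hr2 : k ≤ j ∧ j < k + (c :: cs).length := by
          simp only [List.length_cons]; omega
        have hd : (c :: cs).getD (j - k) "" = cs.getD (j - (k + 1)) "" := by
          have hjk : j - k = (j - (k + 1)) + 1 := by omega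
          rw [hjk, List.getD_cons_succ]
        rw [if_pos hr, hset, if_neg hj, if_pos hr2, hd]
      · have hr2 : ¬ (k ≤ j ∧ j < k + (c :: cs).length) := by
          simp only [List.length_cons]; omega
        rw [if_neg hr, hset, if_neg hj, if_neg hr2]

-- A's outer loop, pointwise: column j of the result is B's column fold seeded at acc.getD j.
theorem outer_desc (rd : List (List String)) (w : Nat) :
    ∀ (acc : List Int), acc.length = w → (∀ row ∈ rd, row.length ≤ w) →
    ((rd.foldl
        (fun lst row =>
          (row.foldl
            (fun (p : List Int × Nat) cell =>
              (p.1.set p.2 (max (PySem.Str.len cell) (p.1.getD p.2 0)), p.2 + 1))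
            (lst, 0)).1) acc).length = w ∧
     ∀ j : Nat,
       (rd.foldl
        (fun lst row =>
          (row.foldl
            (fun (p : List Int × Nat) cell =>
              (p.1.set p.2 (max (PySem.Str.len cell) (p.1.getD p.2 0)), p.2 + 1))
            (lst, 0)).1) acc).getD j 0 =
       rd.foldl
        (fun m row => if j < row.length then max m (PySem.Str.len (row.getD j "")) else m)
        (acc.getD j 0)) := by
  induction rd with
  | nil => intro acc hlen _; exact ⟨hlen, fun _ => rfl⟩
  | cons r rs ih =>
    intro acc hlen hrows
    have hr : r.length ≤ w := hrows r (List.mem_cons_self ..)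
    have hin := inner_desc r acc 0 (by omega)
    obtain ⟨hlen1, hget1⟩ := hin
    simp only [List.foldl_cons]
    obtain ⟨ihlen, ihget⟩ := ih _ (by rw [hlen1, hlen]) (fun row hm => hrows row (List.mem_cons_of_mem _ hm))
    refine ⟨ihlen, ?_⟩
    intro j
    rw [ihget j, hget1 j]
    congr 1
    by_cases hj : j < r.length
    · rw [if_pos (show 0 ≤ j ∧ j < 0 + r.length from ⟨Nat.zero_le _, by omega⟩), if_pos hj]
      simp [max_comm]
    · rw [if_neg (by omega), if_neg hj]

-- ===== VERDICT (by name: the statement is the Claim_ definition above) =====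
theorem find_max_cell_length_spec : Claim_equal_find_max_cell_length := by
  intro rd _ hpre
  obtain ⟨hne, hrows⟩ := hpre
  unfold Spec_find_max_cell_length find_max_cell_length find_max_cell_length_alt
  obtain ⟨r0, rs, rfl⟩ : ∃ r0 rs, rd = r0 :: rs := by
    cases rd with
    | nil => exact absurd rfl hne
    | cons a l => exact ⟨a, l, rfl⟩
  have hget0 : (PySem.List.pyGet? (r0 :: rs) 0).getD [] = r0 := by
    simp [PySem.List.pyGet?, PySem.List.pyIdx?]
  rw [hget0]
  have hrows' : ∀ row ∈ r0 :: rs, row.length ≤ r0.length := by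
    simpa using hrows
  obtain ⟨hlen, hget⟩ := outer_desc (r0 :: rs) r0.length
    (List.replicate r0.length (0 : Int)) (by simp) hrows'
  apply List.ext_getElem
  · simp only [List.length_map, List.length_range, hlen]
  · intro j h1 h2
    have hj : j < r0.length := by
      rw [List.length_map, List.length_range] at h2; exact h2
    have e1 : (List.replicate r0.length (0 : Int)).getD j 0 = 0 := by
      simp [List.getD, hj]
    have := hget j
    rw [e1] at this
    have hA : ((r0 :: rs).foldl
        (fun lst row =>
          (row.foldl
            (fun (p : List Int × Nat) cell =>
              (p.1.set p.2 (max (PySem.Str.len cell) (p.1.getD p.2 0)), p.2 + 1))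
            (lst, 0)).1) (List.replicate r0.length (0 : Int)))[j] =
        ((r0 :: rs).foldl
        (fun lst row =>
          (row.foldl
            (fun (p : List Int × Nat) cell =>
              (p.1.set p.2 (max (PySem.Str.len cell) (p.1.getD p.2 0)), p.2 + 1))
            (lst, 0)).1) (List.replicate r0.length (0 : Int))).getD j 0 := by
      rw [List.getD_eq_getElem?_getD, List.getElem?_eq_getElem h1]
      rfl
    rw [hA, this]
    simp only [List.getElem_map, List.getElem_range]
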